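-- pv_equiv track=rewrite | github.com/ConceptJunkie/rpn | rpn/rpnChemistry.py | splitAtoms
-- ===== SOURCE A (Python) =====
-- import string
--
-- def splitAtoms( expression ):
--     atom = ''
--
--     for c in expression:
--         if c in string.ascii_uppercase:
--             if atom:
--                 yield atom
--
--             atom = c
--         else:
--             atom += c
--
--     yield atom
-- ===== SOURCE B (Python) =====
-- import string
--
-- def splitAtoms(expression):
--     # Staged passes: first find all uppercase boundary positions, then yield
--     # the slices between consecutive boundaries.
--     idx = [i for i, c in enumerate(expression) if c in string.ascii_uppercase]
--     if not idx:
--         yield expression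
--         return
--     if idx[0] > 0:
--         yield expression[:idx[0]]
--     for a, b in zip(idx, idx[1:] + [len(expression)]):
--         yield expression[a:b]
-- ===== Notes on version B (the rewrite author's own statement) =====
-- stated objective: alternative
-- what changed: Replaced A's single accumulate-and-flush generator loop by two staged passes: first collect the uppercase boundary indices with enumerate, then yield the slices between consecutive boundary positions (plus the leading lowercase chunk if any).
import Mathlib
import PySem

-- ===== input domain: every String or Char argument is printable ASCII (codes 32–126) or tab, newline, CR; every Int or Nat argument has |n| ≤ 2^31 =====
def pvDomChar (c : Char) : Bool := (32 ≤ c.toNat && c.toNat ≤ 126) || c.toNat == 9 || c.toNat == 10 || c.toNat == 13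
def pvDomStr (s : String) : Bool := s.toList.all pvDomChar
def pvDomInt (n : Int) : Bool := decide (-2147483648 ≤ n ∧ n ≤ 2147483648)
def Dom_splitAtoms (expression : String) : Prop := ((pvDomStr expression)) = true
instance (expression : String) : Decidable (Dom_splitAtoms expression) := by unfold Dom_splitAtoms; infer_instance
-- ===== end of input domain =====

-- B replaces A's accumulate-and-flush generator loop by two staged passes:
-- collect the uppercase boundary indices, then yield the slices between
-- consecutive boundaries (objective: alternative, same O(n) cost).
-- Both programs are generators; equivalence is about the yielded sequence (as a list).

-- string.ascii_uppercase, and 'c in string.ascii_uppercase' as a Bool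
def pvUpper : List Char := "ABCDEFGHIJKLMNOPQRSTUVWXYZ".toList
def isUp (c : Char) : Bool := c ∈ pvUpper

-- ===== PORT A =====
-- Python str is represented as List Char during the loop (exact: += and truthiness of str);
-- converted back to String at the end; the yielded sequence is the returned list.
def splitAtoms (expression : String) : List String :=
  let fin := expression.toList.foldl
    (fun (st : List (List Char) × List Char) c =>
      if isUp c then
        ((if st.2 ≠ [] then st.1 ++ [st.2] else st.1), [c])
      else
        (st.1, st.2 ++ [c]))
    ([], [])
  (fin.1 ++ [fin.2]).map String.ofList

-- ===== PORT B =====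
-- enumerate → PySem.List.enumerate; expression[:i] / expression[a:b] → PySem.List.slice
-- on the code points (exact); zip(idx, idx[1:] + [len]) → List.zip; yields collected in order.
def splitAtoms_alt (expression : String) : List String :=
  let cs := expression.toList
  let idx : List Int := ((PySem.List.enumerate cs 0).filter (fun p => isUp p.2)).map (·.1)
  match idx with
  | [] => [expression]
  | i0 :: rest =>
    (if 0 < i0 then [String.ofList (PySem.List.slice cs none (some i0))] else [])
      ++ ((i0 :: rest).zip (rest ++ [(cs.length : Int)])).map
          (fun p => String.ofList (PySem.List.slice cs (some p.1) (some p.2)))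

-- ===== PRECONDITION & SPEC =====
def Spec_splitAtoms (expression : String) (out : List String) : Prop := out = splitAtoms_alt expression
instance (expression : String) (out : List String) : Decidable (Spec_splitAtoms expression out) := by unfold Spec_splitAtoms; infer_instance

-- ===== CLAIM =====
def Claim_equal_splitAtoms : Prop := ∀ (expression : String), Dom_splitAtoms expression → Spec_splitAtoms expression (splitAtoms expression)

-- ===== LEMMAS AND PROOFS =====

-- A's loop step, named
def stepA (st : List (List Char) × List Char) (c : Char) : List (List Char) × List Char :=
  if isUp c then
    ((if st.2 ≠ [] then st.1 ++ [st.2] else st.1), [c])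
  else
    (st.1, st.2 ++ [c])

-- canonical chunk decomposition, by structural recursion: every uppercase opens a
-- chunk; the head chunk may be empty (leading uppercase / empty string)
def chunksR : List Char → List (List Char)
  | [] => [[]]
  | c :: cs =>
    if isUp c then [] :: (c :: (chunksR cs).headI) :: (chunksR cs).tail
    else (c :: (chunksR cs).headI) :: (chunksR cs).tail

-- drop an empty head chunk unless it is the only chunk
def normC : List (List Char) → List (List Char)
  | [] :: t :: ts => t :: ts
  | l => l

-- uppercase positions, at the Nat level
def upN : List Char → List Nat
  | [] => []
  | c :: cs => if isUp c then 0 :: (upN cs).map (· + 1) else (upN cs).map (· + 1)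

-- B's non-leading slices, at the Nat level
def bodyC (cs : List Char) : List (List Char) :=
  ((upN cs).zip ((upN cs).drop 1 ++ [cs.length])).map (fun p => (cs.drop p.1).take (p.2 - p.1))

-- B's slice list including the (possibly empty) leading chunk
def fullC (cs : List Char) : List (List Char) :=
  cs.take ((upN cs).headD cs.length) :: bodyC cs

lemma zip_shift (l : List Nat) (c : Char) (cs : List Char) :
    ((l.map (· + 1)).zip ((l.map (· + 1)).drop 1 ++ [cs.length + 1])).map
        (fun p => ((c :: cs).drop p.1).take (p.2 - p.1))
      = (l.zip (l.drop 1 ++ [cs.length])).map (fun p => (cs.drop p.1).take (p.2 - p.1)) := by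
  have h1 : (l.map (· + 1)).drop 1 ++ [cs.length + 1] = (l.drop 1 ++ [cs.length]).map (· + 1) := by
    simp [← List.map_drop]
  rw [h1, List.zip_map, List.map_map]
  exact List.map_congr_left fun p _ => by simp [Prod.map]

lemma bodyC_cons (c : Char) (cs : List Char) :
    bodyC (c :: cs)
      = (if isUp c then [(c :: cs).take ((upN cs).headD cs.length + 1)] else []) ++ bodyC cs := by
  by_cases h : isUp c = true
  · cases hu : upN cs with
    | nil =>
      simp [bodyC, upN, h, hu, List.take_succ_cons]
    | cons a l =>
      have hz := zip_shift (a :: l) c cs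
      simp only [List.map_cons, List.drop_succ_cons, List.drop_zero] at hz
      simp only [bodyC, upN, h, if_true, hu, List.map_cons, List.length_cons,
        List.drop_succ_cons, List.drop_zero]
      rw [List.cons_append, List.zip_cons_cons, List.map_cons, hz]
      simp
  · simp only [bodyC, upN, h, Bool.false_eq_true, if_false]
    have := zip_shift (upN cs) c cs
    simpa [List.length_cons] using this

lemma fullC_eq_chunksR (cs : List Char) : fullC cs = chunksR cs := by
  induction cs with
  | nil => simp [fullC, bodyC, upN, chunksR]
  | cons c cs ih =>
    by_cases h : isUp c = true
    all_goals
      have h1 : (chunksR cs).headI = cs.take ((upN cs).headD cs.length) := by rw [← ih]; rfl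
      have h2 : (chunksR cs).tail = bodyC cs := by rw [← ih]; rfl
    · simp [fullC, chunksR, upN, h, bodyC_cons, h1, h2, List.take_succ_cons, List.headD]
    · have hd : (upN (c :: cs)).headD ((c :: cs).length) = (upN cs).headD cs.length + 1 := by
        cases hu : upN cs <;> simp [upN, h, hu, List.headD]
      simp only [fullC, chunksR, h, Bool.false_eq_true, if_false, bodyC_cons, h1, h2, hd,
        List.take_succ_cons, List.nil_append]

lemma normC_cons_cons (a b : List Char) (ts : List (List Char)) :
    normC (a :: b :: ts) = if a = [] then b :: ts else a :: b :: ts := by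
  cases a <;> simp [normC]

lemma normC_single (a : List Char) : normC [a] = [a] := by
  cases a <;> rfl

lemma normC_cons_ne (a : List Char) (ts : List (List Char)) (h : a ≠ []) :
    normC (a :: ts) = a :: ts := by
  cases a with
  | nil => exact absurd rfl h
  | cons x xs => cases ts <;> rfl

-- A's fold yields the normalised chunk list
lemma A_inv (cs : List Char) : ∀ (acc : List (List Char)) (atom : List Char),
    (cs.foldl stepA (acc, atom)).1 ++ [(cs.foldl stepA (acc, atom)).2]
      = acc ++ normC ((atom ++ (chunksR cs).headI) :: (chunksR cs).tail) := by
  induction cs with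
  | nil => intro acc atom; simp [chunksR, normC_single]
  | cons c cs ih =>
    intro acc atom
    by_cases h : isUp c = true
    · have hstep : stepA (acc, atom) c = ((if atom ≠ [] then acc ++ [atom] else acc), [c]) := by
        simp [stepA, h]
      rw [List.foldl_cons, hstep, ih]
      simp only [chunksR, h, if_true, List.headI, List.tail]
      rw [normC_cons_ne _ _ (by simp), normC_cons_cons]
      by_cases ha : atom = [] <;> simp [ha]
    · have hstep : stepA (acc, atom) c = (acc, atom ++ [c]) := by simp [stepA, h]
      rw [List.foldl_cons, hstep, ih]
      simp only [chunksR, h, Bool.false_eq_true, if_false, List.headI, List.tail]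
      simp

-- the enumerate/filter index list is upN, cast to Int
lemma idx_eq_upN (cs : List Char) (s : Int) :
    ((PySem.List.enumerate cs s).filter (fun p => isUp p.2)).map (·.1)
      = (upN cs).map (fun n : Nat => s + (n : Int)) := by
  induction cs generalizing s with
  | nil => simp [upN, PySem.List.enumerate]
  | cons c cs ih =>
    rw [PySem.List.enumerate_cons]
    by_cases h : isUp c = true
    · simp only [List.filter_cons, h, if_true, List.map_cons, ih, upN]
      simp [List.map_map, Function.comp_def]
      intro n _; ring
    · simp only [List.filter_cons, h, if_false, ih, upN, Bool.false_eq_true]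
      simp [List.map_map, Function.comp_def]
      intro n _; ring

lemma idx_eq_upN_zero (cs : List Char) :
    ((PySem.List.enumerate cs 0).filter (fun p => isUp p.2)).map (·.1)
      = (upN cs).map (fun n : Nat => (n : Int)) := by
  rw [idx_eq_upN]; simp

-- B's Int-level slice expression, reduced to the Nat-level take/drop form
lemma B_eq (cs : List Char) (i0 : Nat) (rest : List Nat) :
    ((if (0 : Int) < (i0 : Int) then [String.ofList (PySem.List.slice cs none (some (i0 : Int)))] else [])
        ++ (((i0 : Int) :: rest.map (fun n : Nat => (n : Int))).zip
              (rest.map (fun n : Nat => (n : Int)) ++ [(cs.length : Int)])).map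
            (fun p => String.ofList (PySem.List.slice cs (some p.1) (some p.2))))
      = (if 0 < i0 then [String.ofList (cs.take i0)] else [])
        ++ ((i0 :: rest).zip (rest ++ [cs.length])).map
            (fun p => String.ofList ((cs.drop p.1).take (p.2 - p.1))) := by
  have hz : ((i0 : Int) :: rest.map (fun n : Nat => (n : Int)))
      = (i0 :: rest).map (fun n : Nat => (n : Int)) := rfl
  have hz2 : rest.map (fun n : Nat => (n : Int)) ++ [(cs.length : Int)]
      = (rest ++ [cs.length]).map (fun n : Nat => (n : Int)) := by simp
  rw [hz, hz2, List.zip_map, List.map_map]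
  congr 1
  · simp [PySem.List.slice_to_natCast]
  · exact List.map_congr_left fun p _ => by simp [Prod.map, PySem.List.slice_natCast]

-- the normalised slice list, mapped to strings, when there is some boundary
lemma map_norm_full (cs : List Char) (i0 : Nat) (rest : List Nat)
    (hu : upN cs = i0 :: rest) (hcs : cs ≠ []) :
    (normC (fullC cs)).map String.ofList
      = (if 0 < i0 then [String.ofList (cs.take i0)] else [])
        ++ ((i0 :: rest).zip (rest ++ [cs.length])).map
            (fun p => String.ofList ((cs.drop p.1).take (p.2 - p.1))) := by
  have hbody : bodyC cs
      = ((i0 :: rest).zip (rest ++ [cs.length])).map (fun p => (cs.drop p.1).take (p.2 - p.1)) := by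
    simp [bodyC, hu]
  have hfull : fullC cs = cs.take i0 :: bodyC cs := by simp [fullC, hu]
  by_cases h0 : 0 < i0
  · have hne : cs.take i0 ≠ [] := by
      simp [List.take_eq_nil_iff, hcs]; omega
    rw [hfull, normC_cons_ne _ _ hne]
    simp [hbody, h0]
  · have h00 : i0 = 0 := by omega
    subst h00
    obtain ⟨b1, bs', hb⟩ : ∃ b1 bs', rest ++ [cs.length] = b1 :: bs' := by
      cases rest <;> exact ⟨_, _, rfl⟩
    rw [hfull, hbody, hb, List.zip_cons_cons, List.map_cons]
    simp [normC]

-- ===== VERDICT =====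
theorem splitAtoms_spec : Claim_equal_splitAtoms := by
  intro expression _
  unfold Spec_splitAtoms splitAtoms splitAtoms_alt
  simp only [show (fun (st : List (List Char) × List Char) c =>
      if isUp c then
        ((if st.2 ≠ [] then st.1 ++ [st.2] else st.1), [c])
      else (st.1, st.2 ++ [c])) = stepA from rfl]
  rw [idx_eq_upN_zero]
  have hA := A_inv expression.toList [] []
  simp only [List.nil_append] at hA
  rw [hA]
  have hcons : (chunksR expression.toList).headI :: (chunksR expression.toList).tail
      = chunksR expression.toList := by
    rw [← fullC_eq_chunksR]; rfl
  rw [hcons, ← fullC_eq_chunksR]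
  cases hu : upN expression.toList with
  | nil =>
    have : fullC expression.toList = [expression.toList] := by
      simp [fullC, bodyC, hu]
    rw [this, normC_single]
    simp
  | cons i0 rest =>
    have hcs : expression.toList ≠ [] := by
      intro hnil; rw [hnil] at hu; simp [upN] at hu
    simp only [List.map_cons]
    rw [map_norm_full expression.toList i0 rest hu hcs, ← B_eq]
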